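-- pv_equiv track=rewrite | github.com/jiasy/PY_Service | Unity/app/services/UnityCSharpAnalyse/AdjustDelegate/AdjustDelegate.py | getContentFromLines
-- ===== SOURCE A (Python) =====
-- def getContentFromLines(lines_: list, startLineIdx_, startCharIdx_, endLineIdx_, endCharIdx_):
--     if startLineIdx_ == endLineIdx_:
--         _line = lines_[startLineIdx_]
--         return _line[startCharIdx_:endCharIdx_ - 1]
--     else:
--         _content = ""
--         _content += lines_[startLineIdx_][startCharIdx_:len(lines_[startLineIdx_])]
--         for _idx in range(startLineIdx_ + 1, endLineIdx_):
--             _content += lines_[_idx]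
--         _content += lines_[endLineIdx_][0:endCharIdx_ - 1]
--         return _content
-- ===== SOURCE B (Python) =====
-- def getContentFromLines(lines_: list, startLineIdx_, startCharIdx_, endLineIdx_, endCharIdx_):
--     # Structural recursion on the line span: take the rest of the current line
--     # and recurse with the start char reset to 0; the one-line span is the base case.
--     if startLineIdx_ == endLineIdx_:
--         return lines_[startLineIdx_][startCharIdx_:endCharIdx_ - 1]
--     return lines_[startLineIdx_][startCharIdx_:] + getContentFromLines(
--         lines_, startLineIdx_ + 1, 0, endLineIdx_, endCharIdx_)
-- ===== Notes on version B (the rewrite author's own statement) =====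
-- stated objective: simpler
-- what changed: Replaces A's same-line/multi-line if-else with an accumulation loop by a structural recursion on the line span: take the tail of the current line and recurse with the start char reset to 0; the one-line span is the base case.
-- outside the precondition, e.g. on getContentFromLines(['ab', 'cd'], 1, 0, 0, 2): A returns 'cda', B raises IndexError
import Mathlib
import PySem

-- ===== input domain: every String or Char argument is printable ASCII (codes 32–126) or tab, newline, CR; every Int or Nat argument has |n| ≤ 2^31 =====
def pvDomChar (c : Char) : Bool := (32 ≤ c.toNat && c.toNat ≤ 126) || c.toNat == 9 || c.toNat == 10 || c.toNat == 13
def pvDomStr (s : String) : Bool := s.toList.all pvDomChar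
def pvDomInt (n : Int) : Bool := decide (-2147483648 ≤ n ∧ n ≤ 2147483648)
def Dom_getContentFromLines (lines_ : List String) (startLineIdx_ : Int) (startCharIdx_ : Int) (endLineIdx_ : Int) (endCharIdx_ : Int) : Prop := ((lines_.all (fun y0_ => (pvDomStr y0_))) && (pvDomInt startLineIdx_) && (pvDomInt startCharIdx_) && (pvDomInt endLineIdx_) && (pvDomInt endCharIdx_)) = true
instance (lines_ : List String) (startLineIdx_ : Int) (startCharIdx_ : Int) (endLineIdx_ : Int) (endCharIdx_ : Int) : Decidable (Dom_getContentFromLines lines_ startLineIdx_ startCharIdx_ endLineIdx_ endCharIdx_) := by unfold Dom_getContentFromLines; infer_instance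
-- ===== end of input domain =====

-- B replaces A's same-line/multi-line branch and += accumulation loop with a
-- structural recursion on the line span (objective: simpler).

-- ===== PORT A =====
def getContentFromLines (lines_ : List String) (startLineIdx_ : Int) (startCharIdx_ : Int) (endLineIdx_ : Int) (endCharIdx_ : Int) : String :=
  if startLineIdx_ = endLineIdx_ then
    let _line := PySem.List.pyGetD lines_ startLineIdx_ ""
    PySem.Str.slice _line (some startCharIdx_) (some (endCharIdx_ - 1))
  else
    let _content : String := ""
    let _content := _content ++ PySem.Str.slice (PySem.List.pyGetD lines_ startLineIdx_ "") (some startCharIdx_) (some (PySem.Str.len (PySem.List.pyGetD lines_ startLineIdx_ "")))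
    let _content := (PySem.List.pyRange (startLineIdx_ + 1) endLineIdx_ 1).foldl (fun acc _idx => acc ++ PySem.List.pyGetD lines_ _idx "") _content
    _content ++ PySem.Str.slice (PySem.List.pyGetD lines_ endLineIdx_ "") (some 0) (some (endCharIdx_ - 1))

-- ===== PORT B =====
-- fuel ((e-s).toNat + 1) only makes the recursion total; inside Pre_ it never runs out
def getContentFromLinesGo (lines_ : List String) (fuel : Nat) (s : Int) (sc : Int) (e : Int) (ec : Int) : String :=
  match fuel with
  | 0 => ""
  | Nat.succ f =>
    if s = e then
      PySem.Str.slice (PySem.List.pyGetD lines_ s "") (some sc) (some (ec - 1))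
    else
      PySem.Str.slice (PySem.List.pyGetD lines_ s "") (some sc) none
        ++ getContentFromLinesGo lines_ f (s + 1) 0 e ec

def getContentFromLines_alt (lines_ : List String) (startLineIdx_ : Int) (startCharIdx_ : Int) (endLineIdx_ : Int) (endCharIdx_ : Int) : String :=
  getContentFromLinesGo lines_ ((endLineIdx_ - startLineIdx_).toNat + 1) startLineIdx_ startCharIdx_ endLineIdx_ endCharIdx_

-- ===== PRECONDITION & SPEC =====
-- Pre_ excludes line indices outside [-len(lines_), len(lines_)) (there A raises IndexError)
-- and reversed spans startLineIdx_ > endLineIdx_, an unspecified corner where A's empty loop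
-- accidentally glues the start line's tail to the end line's head while B's recursion walks
-- past the end of the list and raises IndexError.
def Pre_getContentFromLines (lines_ : List String) (startLineIdx_ : Int) (startCharIdx_ : Int) (endLineIdx_ : Int) (endCharIdx_ : Int) : Prop :=
  -(lines_.length : Int) ≤ startLineIdx_ ∧ startLineIdx_ ≤ endLineIdx_ ∧ endLineIdx_ < (lines_.length : Int)
instance (lines_ : List String) (startLineIdx_ : Int) (startCharIdx_ : Int) (endLineIdx_ : Int) (endCharIdx_ : Int) : Decidable (Pre_getContentFromLines lines_ startLineIdx_ startCharIdx_ endLineIdx_ endCharIdx_) := by unfold Pre_getContentFromLines; infer_instance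

def pvWitness_getContentFromLines : List String × Int × Int × Int × Int := (["ab", "cd"], 0, 1, 1, 1)

def Spec_getContentFromLines (lines_ : List String) (startLineIdx_ : Int) (startCharIdx_ : Int) (endLineIdx_ : Int) (endCharIdx_ : Int) (out : String) : Prop := out = getContentFromLines_alt lines_ startLineIdx_ startCharIdx_ endLineIdx_ endCharIdx_
instance (lines_ : List String) (startLineIdx_ : Int) (startCharIdx_ : Int) (endLineIdx_ : Int) (endCharIdx_ : Int) (out : String) : Decidable (Spec_getContentFromLines lines_ startLineIdx_ startCharIdx_ endLineIdx_ endCharIdx_ out) := by unfold Spec_getContentFromLines; infer_instance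

-- ===== CLAIM (what is proved, stated in full; the proofs are below) =====
def Claim_equal_getContentFromLines : Prop := ∀ (lines_ : List String) (startLineIdx_ : Int) (startCharIdx_ : Int) (endLineIdx_ : Int) (endCharIdx_ : Int), Dom_getContentFromLines lines_ startLineIdx_ startCharIdx_ endLineIdx_ endCharIdx_ → Pre_getContentFromLines lines_ startLineIdx_ startCharIdx_ endLineIdx_ endCharIdx_ → Spec_getContentFromLines lines_ startLineIdx_ startCharIdx_ endLineIdx_ endCharIdx_ (getContentFromLines lines_ startLineIdx_ startCharIdx_ endLineIdx_ endCharIdx_)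

-- ===== LEMMAS AND PROOFS =====

-- s[a:len(s)] = s[a:] (the clamped slice cannot pass the end)
lemma slice_some_length {α : Type} (xs : List α) (a : Int) :
    PySem.List.slice xs (some a) (some (xs.length : Int)) = PySem.List.slice xs (some a) none := by
  simp [PySem.List.slice, PySem.List.clampIdx]; split_ifs <;> omega

-- string accumulation loop, on the character level
lemma foldl_str_toList (l : List Int) (g : Int → String) (acc : String) :
    (l.foldl (fun a i => a ++ g i) acc).toList
      = acc.toList ++ (l.map (fun i => (g i).toList)).flatten := by
  induction l generalizing acc with
  | nil => simp
  | cons x xs ih => simp [ih]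

-- peeling the first line off A's multi-line branch gives A one line later with start char 0
lemma getContentFromLines_step (lines_ : List String) (s sc e ec : Int) (h : s < e) :
    getContentFromLines lines_ s sc e ec
      = PySem.Str.slice (PySem.List.pyGetD lines_ s "") (some sc) none
          ++ getContentFromLines lines_ (s + 1) 0 e ec := by
  have hne : s ≠ e := ne_of_lt h
  unfold getContentFromLines
  rw [if_neg hne]
  by_cases h1 : s + 1 = e
  · rw [if_pos h1]
    subst h1
    rw [PySem.List.pyRange_one_eq_nil (by omega)]
    apply String.toList_inj.mp
    simp [show ((PySem.List.pyGetD lines_ s "").length : Int)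
            = (((PySem.List.pyGetD lines_ s "").toList.length : Nat) : Int) by simp,
      slice_some_length]
  · rw [if_neg h1]
    have h2 : s + 1 < e := lt_of_le_of_ne (by omega) h1
    apply String.toList_inj.mp
    simp [foldl_str_toList, PySem.List.pyRange_one_cons h2,
      show ∀ x : String, ((x.length : Int)) = ((x.toList.length : Nat) : Int) by simp,
      slice_some_length]

-- ===== VERDICT (by name: the statement is the Claim_ definition above) =====
theorem getContentFromLines_spec : Claim_equal_getContentFromLines := by
  intro lines_ s sc e ec hdom hpre
  obtain ⟨h1, h2, h3⟩ := hpre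
  clear h1 h3 hdom
  unfold Spec_getContentFromLines getContentFromLines_alt
  set n := (e - s).toNat with hn
  clear_value n
  have hn' : (e - s).toNat = n := hn.symm
  clear hn
  induction n generalizing s sc with
  | zero =>
    have hse : s = e := by omega
    subst hse
    unfold getContentFromLines getContentFromLinesGo
    rw [if_pos rfl, if_pos rfl]
  | succ m ih =>
    have hslt : s < e := by omega
    rw [getContentFromLines_step lines_ s sc e ec hslt]
    unfold getContentFromLinesGo
    rw [if_neg (ne_of_lt hslt)]
    congr 1
    exact ih (s + 1) 0 (by omega) (by omega)
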